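-- pv_equiv track=rewrite | github.com/hongphat13/Vietnamese_Spelling_Correction | src/hmm_decoder.py | restore_tokens
-- ===== SOURCE A (Python) =====
-- from typing import Dict, List, Tuple
--
-- def restore_tokens(tokens: List[str], replacements: Dict[str, List[str]]) -> List[str]:
--     counts = {k: 0 for k in replacements}
--     restored = []
--     for tok in tokens:
--         if tok in replacements:
--             idx = counts[tok]
--             if idx < len(replacements[tok]):
--                 restored.append(replacements[tok][idx])
--                 counts[tok] += 1
--             else:
--                 restored.append(tok)
--         else:
--             restored.append(tok)
--     return restored
-- ===== SOURCE B (Python) =====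
-- from typing import Dict, List
--
-- def restore_tokens(tokens: List[str], replacements: Dict[str, List[str]]) -> List[str]:
--     # Key-major: index every token's occurrence positions once, then for each
--     # replacement key overwrite its positions pairwise with the replacement
--     # list (zip truncation leaves surplus occurrences as the original token).
--     positions = {}
--     for i, t in enumerate(tokens):
--         positions.setdefault(t, []).append(i)
--     out = list(tokens)
--     for k, reps in replacements.items():
--         for i, r in zip(positions.get(k, []), reps):
--             out[i] = r
--     return out
-- ===== Notes on version B (the rewrite author's own statement) =====
-- stated objective: alternative
-- what changed: B is key-major instead of token-major: it indexes every token's occurrence positions in one enumerate pass, then for each replacement key overwrites that key's positions pairwise with its replacement list into a copy of tokens (zip truncation replaces A's counter dict and idx < len bounds check); Pre_ only excludes association lists with duplicate keys, which cannot arise from Python's dict parameter type.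
import Mathlib
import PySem

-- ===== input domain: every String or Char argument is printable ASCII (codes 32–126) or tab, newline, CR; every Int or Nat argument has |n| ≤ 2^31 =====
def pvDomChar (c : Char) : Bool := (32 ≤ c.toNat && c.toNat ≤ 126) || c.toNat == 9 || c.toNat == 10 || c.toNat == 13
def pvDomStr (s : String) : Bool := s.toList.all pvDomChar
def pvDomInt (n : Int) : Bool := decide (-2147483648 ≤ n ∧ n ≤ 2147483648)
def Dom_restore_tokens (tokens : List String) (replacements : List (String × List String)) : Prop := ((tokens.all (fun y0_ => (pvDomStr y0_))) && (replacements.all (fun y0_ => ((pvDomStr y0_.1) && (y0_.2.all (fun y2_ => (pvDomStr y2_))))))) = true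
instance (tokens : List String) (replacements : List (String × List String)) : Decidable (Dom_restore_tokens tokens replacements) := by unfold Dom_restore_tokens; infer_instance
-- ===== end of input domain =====

-- B is key-major (per-key occurrence positions overwritten pairwise into a copy of tokens)
-- instead of A's token-major single pass with a counter dict — alternative algorithm, same results.


-- ===== PORT A =====
-- loop body of A: 'if tok in replacements: idx = counts[tok]; if idx < len(...): append repl, bump count; else append tok; else append tok'
def stepA (replacements : List (String × List String)) (st : PySem.Dict String Int × List String) (tok : String) : PySem.Dict String Int × List String :=
  match (PySem.Dict.mk replacements).get? tok with
  | some vs =>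
      let idx := st.1.getD tok 0
      if idx < (vs.length : Int) then
        (st.1.insert tok (idx + 1), st.2 ++ [(PySem.List.pyGet? vs idx).getD ""])
      else (st.1, st.2 ++ [tok])
  | none => (st.1, st.2 ++ [tok])

def restore_tokens (tokens : List String) (replacements : List (String × List String)) : List String :=
  -- counts = {k: 0 for k in replacements}
  let counts : PySem.Dict String Int :=
    replacements.foldl (fun d kv => d.insert kv.1 (0 : Int)) PySem.Dict.empty
  (tokens.foldl (stepA replacements) (counts, ([] : List String))).2

-- ===== PORT B =====
-- positions = {}; for i, t in enumerate(tokens): positions.setdefault(t, []).append(i)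
def buildPos (tokens : List String) : PySem.Dict String (List Int) :=
  (PySem.List.enumerate tokens 0).foldl
    (fun d p => d.modify p.2 [] (fun l => l ++ [p.1])) PySem.Dict.empty

-- for i, r in zip(positions.get(k, []), reps): out[i] = r
def passB (pos : PySem.Dict String (List Int)) (out : List String) (kv : String × List String) : List String :=
  ((pos.getD kv.1 []).zip kv.2).foldl (fun o pr => PySem.List.pySetD o pr.1 pr.2) out

def restore_tokens_alt (tokens : List String) (replacements : List (String × List String)) : List String :=
  let positions := buildPos tokens
  replacements.foldl (passB positions) tokens

-- ===== PRECONDITION & SPEC =====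
-- Pre_ only excludes association lists with duplicate keys, which cannot represent any Python
-- dict (the declared parameter type): on them A's first-match lookup and B's per-item passes differ.
def Pre_restore_tokens (tokens : List String) (replacements : List (String × List String)) : Prop :=
  (replacements.map Prod.fst).Nodup
instance (tokens : List String) (replacements : List (String × List String)) : Decidable (Pre_restore_tokens tokens replacements) := by unfold Pre_restore_tokens; infer_instance

def pvWitness_restore_tokens : List String × (List (String × List String)) :=
  (["a", "b", "a", "a"], [("a", ["x", "y"]), ("c", [])])

def Spec_restore_tokens (tokens : List String) (replacements : List (String × List String)) (out : List String) : Prop := out = restore_tokens_alt tokens replacements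
instance (tokens : List String) (replacements : List (String × List String)) (out : List String) : Decidable (Spec_restore_tokens tokens replacements out) := by unfold Spec_restore_tokens; infer_instance

-- ===== CLAIM (what is proved, stated in full; the proofs are below) =====
def Claim_equal_restore_tokens : Prop := ∀ (tokens : List String) (replacements : List (String × List String)), Dom_restore_tokens tokens replacements → Pre_restore_tokens tokens replacements → Spec_restore_tokens tokens replacements (restore_tokens tokens replacements)

-- ===== LEMMAS AND PROOFS =====

-- The value both programs put at a position whose token is `tok` and whose
-- occurrence index (count of `tok` strictly before it) is `c`.
def valF (repl : List (String × List String)) (tok : String) (c : Nat) : String :=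
  match (PySem.Dict.mk repl).get? tok with
  | some vs => vs.getD c tok
  | none => tok

-- The common model: process tokens left to right, tracking the prefix.
def modelA (repl : List (String × List String)) : List String → List String → List String
  | _, [] => []
  | pre, t :: ts => valF repl t (pre.count t) :: modelA repl (pre ++ [t]) ts

-- ---------- A = model ----------

lemma countsZero_getD (l : List (String × List String)) (d : PySem.Dict String Int) (t : String)
    (hd : d.getD t 0 = 0) :
    (l.foldl (fun d kv => d.insert kv.1 (0 : Int)) d).getD t 0 = 0 := by
  induction l generalizing d with
  | nil => exact hd
  | cons p rest ih =>
      simp only [List.foldl_cons]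
      exact ih _ (by rw [PySem.Dict.getD_insert]; split <;> simp [hd])

def CInv (repl : List (String × List String)) (pre : List String) (counts : PySem.Dict String Int) : Prop :=
  ∀ t vs, (PySem.Dict.mk repl).get? t = some vs →
    counts.getD t 0 = ((min (pre.count t) vs.length : Nat) : Int)

lemma A_loop (repl : List (String × List String)) (rest : List String) :
    ∀ (pre : List String) (counts : PySem.Dict String Int) (acc : List String),
      CInv repl pre counts →
      (rest.foldl (stepA repl) (counts, acc)).2 = acc ++ modelA repl pre rest := by
  induction rest with
  | nil => intro pre counts acc _; simp [modelA]
  | cons tok ts ih =>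
      intro pre counts acc hinv
      simp only [List.foldl_cons, modelA]
      cases hg : (PySem.Dict.mk repl).get? tok with
      | none =>
          have hstep : stepA repl (counts, acc) tok = (counts, acc ++ [tok]) := by
            simp [stepA, hg]
          rw [hstep, ih (pre ++ [tok]) counts _ ?_]
          · simp [valF, hg]
          · intro t vs hvs
            have hne : t ≠ tok := fun h => by rw [h, hg] at hvs; cases hvs
            rw [hinv t vs hvs]
            simp [List.count_append, Ne.symm hne]
      | some vs =>
          have hc := hinv tok vs hg
          set c := pre.count tok with hcdef
          by_cases hlt : c < vs.length
          · have hmin : min c vs.length = c := by omega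
            have hidx : counts.getD tok 0 = (c : Int) := by rw [hc, hmin]
            have hget : PySem.List.pyGet? vs ((c : Nat) : Int) = some vs[c] := by
              rw [PySem.List.pyGet?_natCast]; simp [hlt]
            have hstep : stepA repl (counts, acc) tok
                = (counts.insert tok ((c : Int) + 1), acc ++ [vs[c]]) := by
              simp only [stepA, hg, hidx]
              rw [if_pos (by exact_mod_cast hlt)]
              simp [hget]
            rw [hstep, ih (pre ++ [tok]) _ _ ?_]
            · have : valF repl tok c = vs[c] := by
                simp [valF, hg, List.getD_eq_getElem?_getD, hlt]
              rw [this]; simp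
            · intro t vs' hvs'
              by_cases ht : t = tok
              · subst ht
                rw [hg] at hvs'; injection hvs' with h; subst h
                rw [PySem.Dict.getD_insert_self]
                have : (pre ++ [t]).count t = c + 1 := by
                  simp [List.count_append, hcdef]
                rw [this]
                have : min (c + 1) vs.length = c + 1 := by omega
                rw [this]; push_cast; ring
              · rw [PySem.Dict.getD_insert_of_ne _ _ _ ht, hinv t vs' hvs']
                simp [List.count_append, Ne.symm ht]
          · have hmin : min c vs.length = vs.length := by omega
            have hidx : counts.getD tok 0 = (vs.length : Int) := by rw [hc, hmin]
            have hstep : stepA repl (counts, acc) tok = (counts, acc ++ [tok]) := by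
              simp only [stepA, hg, hidx]
              rw [if_neg (by omega)]
            rw [hstep, ih (pre ++ [tok]) counts _ ?_]
            · have : valF repl tok c = tok := by
                have : vs[c]? = none := by
                  rw [List.getElem?_eq_none_iff]; omega
                simp [valF, hg, List.getD_eq_getElem?_getD, this]
              rw [this]; simp
            · intro t vs' hvs'
              by_cases ht : t = tok
              · subst ht
                rw [hg] at hvs'; injection hvs' with h; subst h
                rw [hc, hmin]
                have : (pre ++ [t]).count t = c + 1 := by
                  simp [List.count_append, hcdef]
                rw [this]
                have : min (c + 1) vs.length = vs.length := by omega
                rw [this]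
              · rw [hinv t vs' hvs']
                simp [List.count_append, Ne.symm ht]

lemma A_eq_model (tokens : List String) (repl : List (String × List String)) :
    restore_tokens tokens repl = modelA repl [] tokens := by
  unfold restore_tokens
  rw [A_loop repl tokens [] _ [] ?_]
  · simp
  · intro t vs _
    rw [countsZero_getD _ _ _ (by simp [pysem])]
    simp

-- ---------- model: length and pointwise value ----------

lemma modelA_length (repl : List (String × List String)) (rest : List String) :
    ∀ pre, (modelA repl pre rest).length = rest.length := by
  induction rest with
  | nil => intro _; rfl
  | cons t ts ih => intro pre; simp [modelA, ih]

lemma modelA_get (repl : List (String × List String)) (rest : List String) :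
    ∀ (pre : List String) (i : Nat) (hi : i < rest.length),
      (modelA repl pre rest)[i]? = some (valF repl rest[i] ((pre ++ rest.take i).count rest[i])) := by
  induction rest with
  | nil => intro _ i hi; simp at hi
  | cons t ts ih =>
      intro pre i hi
      cases i with
      | zero => simp [modelA]
      | succ j =>
          have hj : j < ts.length := by simpa using hi
          simp only [modelA, List.getElem?_cons_succ, List.getElem_cons_succ, List.take_succ_cons]
          rw [ih (pre ++ [t]) j hj]
          simp

-- ---------- positions: the occurrence-position index ----------

-- The per-key position list that buildPos assigns to k.
def positionsOf (tokens : List String) (k : String) : List Int :=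
  ((PySem.List.enumerate tokens 0).filter (fun p => p.2 == k)).map (fun p => p.1)

lemma buildPos_getD (tokens : List String) (k : String) :
    (buildPos tokens).getD k [] = positionsOf tokens k := by
  unfold buildPos positionsOf
  have hfold : (PySem.List.enumerate tokens 0).foldl
      (fun (d : PySem.Dict String (List Int)) p => d.modify p.2 [] (fun l => l ++ [p.1]))
      PySem.Dict.empty
    = ((PySem.List.enumerate tokens 0).map Prod.swap).foldl
      (fun (d : PySem.Dict String (List Int)) q => d.modify q.1 [] (fun l => l ++ [q.2]))
      PySem.Dict.empty := by
    rw [List.foldl_map]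
    simp [Prod.swap]
  rw [hfold, PySem.Dict.getD_foldl_modify_append, List.filter_map, List.map_map]
  simp [Function.comp_def, Prod.swap, pysem]

def posAux : List String → String → List Nat
  | [], _ => []
  | t :: ts, k => if t = k then 0 :: (posAux ts k).map (· + 1) else (posAux ts k).map (· + 1)

lemma positionsOf_aux (ts : List String) (k : String) :
    ∀ s : Int, ((PySem.List.enumerate ts s).filter (fun p => p.2 == k)).map (·.1)
      = (posAux ts k).map (fun n : Nat => s + (n : Int)) := by
  induction ts with
  | nil => intro s; simp [PySem.List.enumerate_nil, posAux]
  | cons t ts ih =>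
      intro s
      rw [PySem.List.enumerate_cons]
      simp only [List.filter_cons]
      by_cases h : t = k
      · rw [if_pos (by simp [h])]
        simp only [posAux, if_pos h, List.map_cons, List.map_map, ih (s + 1)]
        refine congrArg₂ List.cons (by simp) ?_
        apply List.map_congr_left; intro n _
        simp only [Function.comp_apply]; push_cast; ring
      · rw [if_neg (by simp [h])]
        simp only [posAux, if_neg h, List.map_map, ih (s + 1)]
        apply List.map_congr_left; intro n _
        simp only [Function.comp_apply]; push_cast; ring

lemma positionsOf_eq (ts : List String) (k : String) :
    positionsOf ts k = (posAux ts k).map (fun n : Nat => (n : Int)) := by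
  unfold positionsOf
  rw [positionsOf_aux ts k 0]
  apply List.map_congr_left; intro n _; simp

lemma posAux_mem (ts : List String) (k : String) :
    ∀ p ∈ posAux ts k, p < ts.length ∧ ts[p]? = some k := by
  induction ts with
  | nil => intro p hp; simp [posAux] at hp
  | cons t rest ih =>
      intro p hp
      by_cases h : t = k <;> simp only [posAux, if_pos, h] at hp
      · rcases List.mem_cons.mp hp with h0 | hmap
        · subst h0; simp [h]
        · obtain ⟨q, hq, rfl⟩ := List.mem_map.mp hmap
          have := ih q hq
          simp [this.2]; omega
      · obtain ⟨q, hq, rfl⟩ := List.mem_map.mp hp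
        have := ih q hq
        simp [this.2]; omega

lemma posAux_nodup (ts : List String) (k : String) : (posAux ts k).Nodup := by
  induction ts with
  | nil => simp [posAux]
  | cons t rest ih =>
      have hmap : ((posAux rest k).map (· + 1)).Nodup :=
        ih.map (fun a b h => by omega)
      by_cases h : t = k <;> simp only [posAux, if_pos, h]
      · refine List.nodup_cons.mpr ⟨?_, hmap⟩
        intro hmem
        obtain ⟨q, _, hq⟩ := List.mem_map.mp hmem
        omega
      · exact hmap

lemma idxOf_map_succ (l : List Nat) (x : Nat) (hx : x ∈ l) :
    (l.map (· + 1)).idxOf (x + 1) = l.idxOf x := by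
  induction l with
  | nil => simp at hx
  | cons a rest ih =>
      by_cases h : a = x
      · subst h; simp
      · have hx' : x ∈ rest := by rcases List.mem_cons.mp hx with h' | h' <;> [omega; exact h']
        rw [List.map_cons, List.idxOf_cons_ne _ (by omega), List.idxOf_cons_ne _ (by omega), ih hx']

lemma posAux_idx (ts : List String) (k : String) :
    ∀ (i : Nat), i < ts.length → ts[i]? = some k →
      i ∈ posAux ts k ∧ (posAux ts k).idxOf i = (ts.take i).count k := by
  induction ts with
  | nil => intro i hi _; simp at hi
  | cons t rest ih =>
      intro i hi hk
      cases i with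
      | zero =>
          simp only [List.getElem?_cons_zero, Option.some_inj] at hk
          simp [posAux, hk]
      | succ j =>
          have hj : j < rest.length := by simpa using hi
          have hk' : rest[j]? = some k := by simpa using hk
          obtain ⟨hmem, hidx⟩ := ih j hj hk'
          have hmem1 : j + 1 ∈ (posAux rest k).map (· + 1) :=
            List.mem_map.mpr ⟨j, hmem, rfl⟩
          have hidx1 : ((posAux rest k).map (· + 1)).idxOf (j + 1) = (rest.take j).count k :=
            by rw [idxOf_map_succ _ _ hmem, hidx]
          by_cases h : t = k
          · subst h
            have hunf : posAux (t :: rest) t = 0 :: (posAux rest t).map (· + 1) := by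
              simp [posAux]
            rw [hunf, List.take_succ_cons, List.count_cons_self]
            refine ⟨List.mem_cons_of_mem _ hmem1, ?_⟩
            rw [List.idxOf_cons_ne _ (by omega), hidx1]
          · have hunf : posAux (t :: rest) k = (posAux rest k).map (· + 1) := by
              simp [posAux, h]
            rw [hunf, List.take_succ_cons, List.count_cons]
            refine ⟨hmem1, ?_⟩
            rw [hidx1]
            simp [h]

lemma posAux_not_mem (ts : List String) (k : String) (i : Nat) (hk : ts[i]? ≠ some k) :
    i ∉ posAux ts k := by
  intro hmem
  exact hk (posAux_mem ts k i hmem).2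

-- ---------- the zip-set fold ----------

lemma setZip_int_nat (q : List Nat) (vs out : List String) :
    ((q.map (fun n : Nat => (n : Int))).zip vs).foldl (fun o pr => PySem.List.pySetD o pr.1 pr.2) out
      = (q.zip vs).foldl (fun o pr => o.set pr.1 pr.2) out := by
  induction q generalizing vs out with
  | nil => rfl
  | cons p ps ih =>
      cases vs with
      | nil => rfl
      | cons r rs =>
          simp only [List.map_cons, List.zip_cons_cons, List.foldl_cons]
          rw [PySem.List.pySetD_natCast, ih]

lemma setZip_length (q : List Nat) (vs out : List String) :
    ((q.zip vs).foldl (fun o pr => o.set pr.1 pr.2) out).length = out.length := by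
  induction q generalizing vs out with
  | nil => rfl
  | cons p ps ih =>
      cases vs with
      | nil => rfl
      | cons r rs =>
          simp only [List.zip_cons_cons, List.foldl_cons]
          rw [ih, List.length_set]

lemma setZip_not_mem (i : Nat) (q : List Nat) :
    ∀ (vs out : List String), i ∉ q →
      ((q.zip vs).foldl (fun o pr => o.set pr.1 pr.2) out)[i]? = out[i]? := by
  induction q with
  | nil => intro vs out _; rfl
  | cons p ps ih =>
      intro vs out hi
      cases vs with
      | nil => rfl
      | cons r rs =>
          simp only [List.zip_cons_cons, List.foldl_cons]
          rw [ih _ _ (fun h => hi (List.mem_cons_of_mem _ h))]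
          rw [List.getElem?_set_ne (fun h => hi (by simp [h]))]

lemma setZip_mem (i : Nat) (q : List Nat) :
    ∀ (vs out : List String), q.Nodup → (∀ p ∈ q, p < out.length) → i ∈ q →
      ((q.zip vs).foldl (fun o pr => o.set pr.1 pr.2) out)[i]?
        = if h : q.idxOf i < vs.length then some vs[q.idxOf i] else out[i]? := by
  induction q with
  | nil => intro vs out _ _ hi; simp at hi
  | cons p ps ih =>
      intro vs out hnd hq hi
      cases vs with
      | nil =>
          simp only [List.zip_nil_right, List.foldl_nil]
          rw [dif_neg (by simp)]
      | cons r rs =>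
          simp only [List.zip_cons_cons, List.foldl_cons]
          by_cases h : i = p
          · subst h
            have hnotin : i ∉ ps := (List.nodup_cons.mp hnd).1
            rw [setZip_not_mem _ _ _ _ hnotin]
            rw [List.getElem?_set_self (by exact hq i hi)]
            rw [List.idxOf_cons_self]
            simp
          · have hi' : i ∈ ps := by rcases List.mem_cons.mp hi with h' | h' <;> [exact absurd h' h; exact h']
            rw [ih rs (out.set p r) (List.nodup_cons.mp hnd).2
                (fun x hx => by rw [List.length_set]; exact hq x (List.mem_cons_of_mem _ hx)) hi']
            rw [List.idxOf_cons_ne _ (fun hh => h hh.symm)]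
            by_cases hlt : ps.idxOf i < rs.length
            · rw [dif_pos hlt, dif_pos (by simp; omega)]
              simp
            · rw [dif_neg hlt, dif_neg (by simp; omega)]
              rw [List.getElem?_set_ne (fun hh => h hh.symm)]

-- ---------- one pass of B ----------

lemma passB_length (tokens out : List String) (kv : String × List String)
    (h : out.length = tokens.length) : (passB (buildPos tokens) out kv).length = tokens.length := by
  unfold passB
  rw [buildPos_getD, positionsOf_eq, setZip_int_nat, setZip_length, h]

lemma passB_get (tokens out : List String) (k : String) (vs : List String)
    (hlen : out.length = tokens.length) (i : Nat) (hi : i < tokens.length) :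
    (passB (buildPos tokens) out (k, vs))[i]?
      = if h : tokens[i] = k ∧ (tokens.take i).count k < vs.length
        then some vs[(tokens.take i).count k] else out[i]? := by
  unfold passB
  rw [buildPos_getD, positionsOf_eq, setZip_int_nat]
  by_cases hk : tokens[i] = k
  · have hk' : tokens[i]? = some k := by rw [List.getElem?_eq_getElem hi, hk]
    obtain ⟨hmem, hidx⟩ := posAux_idx tokens k i hi hk'
    rw [setZip_mem i (posAux tokens k) vs out (posAux_nodup tokens k)
        (fun p hp => by rw [hlen]; exact (posAux_mem tokens k p hp).1) hmem]
    rw [hidx]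
    by_cases hlt : (tokens.take i).count k < vs.length
    · rw [dif_pos hlt, dif_pos ⟨hk, hlt⟩]
    · rw [dif_neg hlt, dif_neg (by tauto)]
  · have : i ∉ posAux tokens k := posAux_not_mem tokens k i (by
      rw [List.getElem?_eq_getElem hi]; exact fun h => hk (Option.some_inj.mp h))
    rw [setZip_not_mem i (posAux tokens k) vs out this, dif_neg (by tauto)]

-- ---------- B's fold over replacements ----------

lemma get?_mk_append (l1 l2 : List (String × List String)) (t : String) :
    (PySem.Dict.mk (l1 ++ l2)).get? t
      = ((PySem.Dict.mk l1).get? t).orElse (fun _ => (PySem.Dict.mk l2).get? t) := by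
  induction l1 with
  | nil => rfl
  | cons p rest ih =>
      obtain ⟨k, v⟩ := p
      rw [List.cons_append, PySem.Dict.get?_mk_cons, PySem.Dict.get?_mk_cons]
      by_cases h : (k == t) = true
      · rw [if_pos h, if_pos h]; rfl
      · rw [if_neg h, if_neg h, ih]

lemma get?_mk_none_of_not_mem (l : List (String × List String)) (t : String)
    (h : t ∉ l.map Prod.fst) : (PySem.Dict.mk l).get? t = none := by
  induction l with
  | nil => simp [pysem]
  | cons p rest ih =>
      rw [PySem.Dict.get?_mk_cons]
      rw [if_neg (by simp at h; simp [beq_iff_eq]; tauto)]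
      exact ih (by simp at h ⊢; tauto)

lemma B_loop (tokens : List String) (pending : List (String × List String)) :
    ∀ (done : List (String × List String)) (out : List String),
      ((done ++ pending).map Prod.fst).Nodup →
      out.length = tokens.length →
      (∀ (i : Nat) (hi : i < tokens.length),
          out[i]? = some (valF done tokens[i] ((tokens.take i).count tokens[i]))) →
      ∀ (i : Nat) (hi : i < tokens.length),
        (pending.foldl (passB (buildPos tokens)) out)[i]?
          = some (valF (done ++ pending) tokens[i] ((tokens.take i).count tokens[i])) := by
  induction pending with
  | nil => intro done out _ _ hout i hi; simpa using hout i hi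
  | cons kv rest ih =>
      obtain ⟨k, vs⟩ := kv
      intro done out hnd hlen hout i hi
      simp only [List.foldl_cons]
      have hkfresh : k ∉ done.map Prod.fst := by
        intro hk
        have h2 := List.nodup_append.mp
          (show ((done.map Prod.fst) ++ (((k, vs) :: rest).map Prod.fst)).Nodup by
            simpa using hnd)
        exact h2.2.2 k hk k (show k ∈ ((k, vs) :: rest).map Prod.fst by simp) rfl
      have hval : ∀ (j : Nat) (hj : j < tokens.length),
          valF (done ++ [(k, vs)]) tokens[j] ((tokens.take j).count tokens[j])
            = if h : tokens[j] = k ∧ (tokens.take j).count k < vs.length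
              then vs[(tokens.take j).count k]
              else valF done tokens[j] ((tokens.take j).count tokens[j]) := by
        intro j hj
        by_cases hkj : tokens[j] = k
        · have hdone : (PySem.Dict.mk done).get? k = none :=
            get?_mk_none_of_not_mem done k hkfresh
          have happ : (PySem.Dict.mk (done ++ [(k, vs)])).get? k = some vs := by
            have h1 : (PySem.Dict.mk [(k, vs)]).get? k = some vs := by
              rw [PySem.Dict.get?_mk_cons, if_pos (by simp)]
            rw [get?_mk_append, hdone]
            simp [Option.orElse, h1]
          by_cases hlt : (tokens.take j).count k < vs.length
          · rw [dif_pos ⟨hkj, hlt⟩]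
            simp only [hkj]
            simp [valF, happ, List.getD_eq_getElem?_getD, List.getElem?_eq_getElem hlt]
          · rw [dif_neg (fun hc => hlt hc.2)]
            simp only [hkj]
            have hnone : vs[(tokens.take j).count k]? = none := by
              rw [List.getElem?_eq_none_iff]; omega
            simp [valF, happ, hdone, List.getD_eq_getElem?_getD, hnone]
        · rw [dif_neg (fun hc => hkj hc.1)]
          have heq : (PySem.Dict.mk (done ++ [(k, vs)])).get? tokens[j]
              = (PySem.Dict.mk done).get? tokens[j] := by
            rw [get?_mk_append]
            cases hdone : (PySem.Dict.mk done).get? tokens[j] with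
            | some w => rfl
            | none =>
                have h2 : (PySem.Dict.mk [(k, vs)]).get? tokens[j] = none := by
                  rw [PySem.Dict.get?_mk_cons,
                      if_neg (by simpa [beq_iff_eq] using fun h => hkj h.symm)]
                  simp [pysem]
                simp [Option.orElse, h2]
          simp [valF, heq]
      have hsplit : done ++ (k, vs) :: rest = (done ++ [(k, vs)]) ++ rest := by simp
      rw [hsplit]
      refine ih (done ++ [(k, vs)]) (passB (buildPos tokens) out (k, vs)) ?_
        (passB_length tokens out _ hlen) ?_ i hi
      · rw [← hsplit]; exact hnd
      · intro j hj
        rw [passB_get tokens out k vs hlen j hj, hval j hj]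
        by_cases h : tokens[j] = k ∧ (tokens.take j).count k < vs.length
        · rw [dif_pos h, dif_pos h]
        · rw [dif_neg h, dif_neg h, hout j hj]

lemma foldB_length (tokens : List String) (l : List (String × List String)) :
    ∀ out : List String, out.length = tokens.length →
      (l.foldl (passB (buildPos tokens)) out).length = tokens.length := by
  induction l with
  | nil => intro out h; exact h
  | cons kv rest ih =>
      intro out h
      simp only [List.foldl_cons]
      exact ih _ (passB_length tokens out kv h)

lemma B_eq_model (tokens : List String) (repl : List (String × List String))
    (hnd : (repl.map Prod.fst).Nodup) :
    restore_tokens_alt tokens repl = modelA repl [] tokens := by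
  unfold restore_tokens_alt
  apply List.ext_getElem?
  intro n
  by_cases hn : n < tokens.length
  · rw [B_loop tokens repl [] tokens (by simpa using hnd) rfl ?_ n hn,
        modelA_get repl tokens [] n hn]
    · simp
    · intro i hi
      rw [List.getElem?_eq_getElem hi]
      rfl
  · rw [List.getElem?_eq_none_iff.mpr, List.getElem?_eq_none_iff.mpr]
    · rw [modelA_length]; omega
    · rw [foldB_length tokens repl tokens rfl]; omega

-- ===== VERDICT (by name: the statement is the Claim_ definition above) =====
theorem restore_tokens_spec : Claim_equal_restore_tokens := by
  intro tokens replacements _ hpre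
  unfold Spec_restore_tokens
  rw [A_eq_model, B_eq_model tokens replacements hpre]
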